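-- pv_equiv track=rewrite | github.com/zgjsxx/OpenEMS | src/web/admin_server.py | _highest_severity
-- ===== SOURCE A (Python) =====
-- from typing import Any, Dict, List, Optional
--
-- def _highest_severity(alarms: List[Dict[str, Any]]) -> str:
--     rank = {"info": 1, "warning": 2, "critical": 3}
--     highest = ""
--     for alarm in alarms:
--         severity = str(alarm.get("severity") or "").lower()
--         if rank.get(severity, 0) > rank.get(highest, 0):
--             highest = severity
--     return highest
-- ===== SOURCE B (Python) =====
-- from typing import Any, Dict, List
--
--
-- def _highest_severity(alarms: List[Dict[str, Any]]) -> str: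
--     present = {str(a.get("severity") or "").lower() for a in alarms}
--     for level in ("critical", "warning", "info"):
--         if level in present:
--             return level
--     return ""
-- ===== Notes on version B (the rewrite author's own statement) =====
-- stated objective: alternative
-- what changed: Replaces the per-alarm running-max scan (rank dict, mutable 'highest') with building the set of normalized severities once and scanning the three severity levels in descending priority, returning the first one present.
import Mathlib
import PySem

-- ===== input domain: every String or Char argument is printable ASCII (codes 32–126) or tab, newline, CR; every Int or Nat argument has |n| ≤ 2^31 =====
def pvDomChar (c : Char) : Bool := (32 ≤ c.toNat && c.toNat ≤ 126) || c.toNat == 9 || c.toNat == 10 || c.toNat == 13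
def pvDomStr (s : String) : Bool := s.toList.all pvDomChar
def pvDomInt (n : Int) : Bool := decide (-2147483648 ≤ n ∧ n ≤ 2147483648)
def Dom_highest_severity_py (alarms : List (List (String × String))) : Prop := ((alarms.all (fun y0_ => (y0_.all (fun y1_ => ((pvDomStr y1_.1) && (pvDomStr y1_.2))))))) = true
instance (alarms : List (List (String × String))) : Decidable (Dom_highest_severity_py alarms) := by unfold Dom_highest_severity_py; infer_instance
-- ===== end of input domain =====

-- B changes the traversal (priority-level scan over a set of normalized severities instead of
-- A's per-alarm running-max with a rank dict); same cost, alternative structure.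

-- ===== PORT A =====
-- str(alarm.get("severity") or "").lower()  — 'x or ""' on an optional string: "" for None or ""
def highest_severity_py (alarms : List (List (String × String))) : String :=
  let rank := PySem.Dict.mk [("info", (1 : Int)), ("warning", 2), ("critical", 3)]
  alarms.foldl
    (fun highest alarm =>
      let severity := PySem.Str.lower
        (match (PySem.Dict.mk alarm).get? "severity" with
         | none => ""
         | some v => if v = "" then "" else v)
      if rank.getD severity 0 > rank.getD highest 0 then severity else highest)
    ""

-- ===== PORT B =====
def highest_severity_py_alt (alarms : List (List (String × String))) : String :=
  let present : PySem.Set String :=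
    PySem.Set.ofList
      (alarms.map (fun a => PySem.Str.lower
        (match (PySem.Dict.mk a).get? "severity" with
         | none => ""
         | some v => if v = "" then "" else v)))
  match ["critical", "warning", "info"].find? (fun level => PySem.Set.contains present level) with
  | some level => level
  | none => ""

-- ===== PRECONDITION & SPEC =====
def Spec_highest_severity_py (alarms : List (List (String × String))) (out : String) : Prop := out = highest_severity_py_alt alarms
instance (alarms : List (List (String × String))) (out : String) : Decidable (Spec_highest_severity_py alarms out) := by unfold Spec_highest_severity_py; infer_instance

-- ===== CLAIM (what is proved, stated in full; the proofs are below) =====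
def Claim_equal_highest_severity_py : Prop := ∀ (alarms : List (List (String × String))), Dom_highest_severity_py alarms → Spec_highest_severity_py alarms (highest_severity_py alarms)

-- ===== LEMMAS AND PROOFS =====

-- the numeric rank A's dict assigns, as a plain function
def pvRk (s : String) : Int :=
  if s = "info" then 1 else if s = "warning" then 2 else if s = "critical" then 3 else 0

-- the normalized severity, shared shape of both ports' per-alarm expression
def pvSev (a : List (String × String)) : String :=
  PySem.Str.lower
    (match (PySem.Dict.mk a).get? "severity" with
     | none => ""
     | some v => if v = "" then "" else v)

lemma pvRank_getD (s : String) :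
    (PySem.Dict.mk [("info", (1 : Int)), ("warning", 2), ("critical", 3)]).getD s 0 = pvRk s := by
  by_cases h1 : s = "info"
  · subst h1; decide
  by_cases h2 : s = "warning"
  · subst h2; decide
  by_cases h3 : s = "critical"
  · subst h3; decide
  have b1 : ("info" == s) = false := beq_eq_false_iff_ne.mpr (fun e => h1 e.symm)
  have b2 : ("warning" == s) = false := beq_eq_false_iff_ne.mpr (fun e => h2 e.symm)
  have b3 : ("critical" == s) = false := beq_eq_false_iff_ne.mpr (fun e => h3 e.symm)
  simp [PySem.Dict.getD, PySem.Dict.get?, b1, b2, b3, pvRk, h1, h2, h3]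

lemma pvFoldl_char (sevs : List String) (h : String)
    (hh : h = "" ∨ h = "info" ∨ h = "warning" ∨ h = "critical") :
    sevs.foldl (fun highest s => if pvRk s > pvRk highest then s else highest) h =
      if "critical" = h ∨ "critical" ∈ sevs then "critical"
      else if "warning" = h ∨ "warning" ∈ sevs then "warning"
      else if "info" = h ∨ "info" ∈ sevs then "info"
      else "" := by
  induction sevs generalizing h with
  | nil =>
    rcases hh with rfl | rfl | rfl | rfl <;> simp
  | cons s t ih =>
    simp only [List.foldl_cons]
    by_cases hs1 : s = "critical"
    · subst hs1
      have hstep : (if pvRk "critical" > pvRk h then "critical" else h) = "critical" := by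
        rcases hh with rfl | rfl | rfl | rfl <;> decide
      rw [hstep, ih "critical" (by simp)]
      simp
    by_cases hs2 : s = "warning"
    · subst hs2
      have hstep : (if pvRk "warning" > pvRk h then "warning" else h) =
          if h = "critical" then "critical" else "warning" := by
        rcases hh with rfl | rfl | rfl | rfl <;> decide
      rw [hstep]
      by_cases hc : h = "critical"
      · rw [if_pos hc, ih "critical" (by simp), hc]
        simp
      · rw [if_neg hc, ih "warning" (by simp)]
        simp [Ne.symm hc, Ne.symm hs1]
    by_cases hs3 : s = "info"
    · subst hs3
      have hstep : (if pvRk "info" > pvRk h then "info" else h) =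
          if h = "" ∨ h = "info" then "info" else h := by
        rcases hh with rfl | rfl | rfl | rfl <;> decide
      rw [hstep]
      by_cases hlo : h = "" ∨ h = "info"
      · rw [if_pos hlo, ih "info" (by simp)]
        rcases hlo with rfl | rfl <;> simp
      · rw [if_neg hlo, ih h hh]
        rcases hh with rfl | rfl | rfl | rfl <;> simp_all
    · have h0 : pvRk s = 0 := by simp [pvRk, hs1, hs2, hs3]
      have hstep : (if pvRk s > pvRk h then s else h) = h := by
        rw [h0]
        rcases hh with rfl | rfl | rfl | rfl <;> simp [pvRk]
      rw [hstep, ih h hh]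
      simp [Ne.symm hs1, Ne.symm hs2, Ne.symm hs3]

lemma pvA_char (alarms : List (List (String × String))) :
    highest_severity_py alarms =
      if "critical" ∈ alarms.map pvSev then "critical"
      else if "warning" ∈ alarms.map pvSev then "warning"
      else if "info" ∈ alarms.map pvSev then "info"
      else "" := by
  have e : highest_severity_py alarms =
      (alarms.map pvSev).foldl (fun highest s => if pvRk s > pvRk highest then s else highest) "" := by
    rw [List.foldl_map]
    simp only [highest_severity_py, pvSev, pvRank_getD]
  rw [e, pvFoldl_char _ "" (Or.inl rfl)]
  simp

lemma pvB_char (alarms : List (List (String × String))) :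
    highest_severity_py_alt alarms =
      if "critical" ∈ alarms.map pvSev then "critical"
      else if "warning" ∈ alarms.map pvSev then "warning"
      else if "info" ∈ alarms.map pvSev then "info"
      else "" := by
  have e : highest_severity_py_alt alarms =
      (match ["critical", "warning", "info"].find?
          (fun level => PySem.Set.contains (PySem.Set.ofList (alarms.map pvSev)) level) with
       | some level => level
       | none => "") := rfl
  rw [e]
  by_cases h1 : "critical" ∈ alarms.map pvSev <;>
    by_cases h2 : "warning" ∈ alarms.map pvSev <;>
      by_cases h3 : "info" ∈ alarms.map pvSev <;>
        simp [List.find?, PySem.Set.mem_ofList, h1, h2, h3]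

-- ===== VERDICT (by name: the statement is the Claim_ definition above) =====
theorem highest_severity_py_spec : Claim_equal_highest_severity_py := by
  intro alarms _
  unfold Spec_highest_severity_py
  rw [pvA_char, pvB_char]
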